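-- pv_equiv track=rewrite | github.com/mackot1337/Jezyki-Skryptowe | lab2/sentencesWithSpecificWords_3j.py | process_3j
-- ===== SOURCE A (Python) =====
-- def is_target_word(word):
--     w = ""
--     for c in word:
--         w += c.lower()
--
--     if w == "i" or w == "oraz" or w == "ale" or w == "że" or w == "lub":
--         return True
--     return False
--
-- def process_3j(sentence):
--     target_count = 0
--     current_word = ""
--
--     for c in sentence:
--         if c.isalpha():
--             current_word += c
--         else:
--             if current_word != "":
--                 if is_target_word(current_word):
--                     target_count += 1
--                 current_word = ""
--
--     # Sprawdzenie ostatniego wyrazu (jeśli zdanie nie kończy się znakiem interpunkcyjnym)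
--     if current_word != "":
--         if is_target_word(current_word):
--             target_count += 1
--
--     if target_count >= 2:
--         return sentence
--     return ""
-- ===== SOURCE B (Python) =====
-- def process_3j(sentence):
--     targets = {"i", "oraz", "ale", "że", "lub"}
--     # Phase 1: tokenize into maximal alphabetic runs.
--     words = []
--     i, n = 0, len(sentence)
--     while i < n:
--         if sentence[i].isalpha():
--             j = i
--             while j < n and sentence[j].isalpha():
--                 j += 1
--             words.append(sentence[i:j])
--             i = j
--         else:
--             i += 1
--     # Phase 2: count target conjunctions.
--     count = sum(w.lower() in targets for w in words)
--     return sentence if count >= 2 else ""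
-- ===== Notes on version B (the rewrite author's own statement) =====
-- stated objective: alternative
-- what changed: Replaced A's single interleaved loop that accumulates a word character-by-character and checks/resets it at each non-letter with a two-phase pass: first tokenize the sentence into maximal alphabetic runs (an index scan with an inner run-skipping loop), then count how many tokens are target conjunctions in one membership sum.
import Mathlib
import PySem

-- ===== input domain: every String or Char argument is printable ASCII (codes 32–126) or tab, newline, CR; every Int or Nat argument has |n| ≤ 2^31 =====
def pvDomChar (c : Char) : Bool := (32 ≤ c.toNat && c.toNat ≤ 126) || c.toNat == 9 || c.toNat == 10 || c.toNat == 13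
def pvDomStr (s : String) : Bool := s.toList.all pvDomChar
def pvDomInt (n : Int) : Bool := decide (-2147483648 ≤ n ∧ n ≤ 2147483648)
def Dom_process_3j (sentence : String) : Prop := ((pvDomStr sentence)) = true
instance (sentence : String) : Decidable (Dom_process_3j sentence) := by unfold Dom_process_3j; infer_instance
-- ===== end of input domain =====

-- B replaces A's interleaved accumulate-and-check loop by a two-phase pass
-- (tokenize into maximal alphabetic runs, then count target words); objective: alternative decomposition, same cost.

-- ===== PORT A =====
def pv_is_target_word (word : List Char) : Bool :=
  let w := word.foldl (fun acc c => acc ++ [PySem.Chars.lowerChar c]) []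
  if w = "i".toList ∨ w = "oraz".toList ∨ w = "ale".toList ∨ w = "że".toList ∨ w = "lub".toList
  then true else false

def pvStepA (st : Nat × List Char) (c : Char) : Nat × List Char :=
  if PySem.Chars.isalpha c then (st.1, st.2 ++ [c])
  else if st.2 ≠ [] then ((if pv_is_target_word st.2 then st.1 + 1 else st.1), ([] : List Char))
  else st

def process_3j (sentence : String) : String :=
  let st := sentence.toList.foldl pvStepA (0, ([] : List Char))
  let tc := if st.2 ≠ [] then (if pv_is_target_word st.2 then st.1 + 1 else st.1) else st.1
  if tc ≥ 2 then sentence else ""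

-- ===== PORT B =====
def pvTargets : List (List Char) := ["i".toList, "oraz".toList, "ale".toList, "że".toList, "lub".toList]

-- hand port of the tokenizing scan (maximal alphabetic runs), exact on all inputs
def pvWords : List Char → List (List Char)
  | [] => []
  | c :: cs =>
    if PySem.Chars.isalpha c then
      ((c :: cs).takeWhile PySem.Chars.isalpha) :: pvWords ((c :: cs).dropWhile PySem.Chars.isalpha)
    else pvWords cs
termination_by cs => cs.length
decreasing_by
  · simp only [List.dropWhile_cons, *, if_pos]
    exact Nat.lt_succ_of_le (List.length_dropWhile_le _ _)
  · simp

def process_3j_alt (sentence : String) : String :=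
  let count := (pvWords sentence.toList).countP (fun w => pvTargets.contains (PySem.Chars.lower w))
  if count ≥ 2 then sentence else ""

-- ===== PRECONDITION & SPEC =====
def Spec_process_3j (sentence : String) (out : String) : Prop := out = process_3j_alt sentence
instance (sentence : String) (out : String) : Decidable (Spec_process_3j sentence out) := by unfold Spec_process_3j; infer_instance

-- ===== CLAIM (what is proved, stated in full; the proofs are below) =====
def Claim_equal_process_3j : Prop := ∀ (sentence : String), Dom_process_3j sentence → Spec_process_3j sentence (process_3j sentence)

-- ===== LEMMAS AND PROOFS =====

-- the two target tests agree
theorem pv_target_eq (w : List Char) :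
    pv_is_target_word w = pvTargets.contains (PySem.Chars.lower w) := by
  simp only [pv_is_target_word, pvTargets, PySem.List.foldl_append_singleton_eq_map,
    List.contains_eq_mem, List.mem_cons, List.not_mem_nil, or_false]
  have : PySem.Chars.lower w = w.map PySem.Chars.lowerChar := rfl
  rw [this]
  split_ifs with h
  · exact (decide_eq_true h).symm
  · exact (decide_eq_false h).symm

def pvIsTgt (w : List Char) : Bool := pvTargets.contains (PySem.Chars.lower w)

-- A's loop with pending word `cur`: the words it will complete
def pvWordsFrom (cur : List Char) : List Char → List (List Char)
  | [] => if cur = [] then [] else [cur]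
  | c :: cs =>
    if PySem.Chars.isalpha c then pvWordsFrom (cur ++ [c]) cs
    else if cur = [] then pvWordsFrom [] cs else cur :: pvWordsFrom [] cs

def pvFinish (st : Nat × List Char) : Nat :=
  if st.2 ≠ [] then (if pv_is_target_word st.2 then st.1 + 1 else st.1) else st.1

theorem pv_target_eq' (w : List Char) : pv_is_target_word w = pvIsTgt w :=
  pv_target_eq w

theorem pv_foldA_eq (cs : List Char) : ∀ (tc : Nat) (cur : List Char),
    pvFinish (cs.foldl pvStepA (tc, cur)) = tc + (pvWordsFrom cur cs).countP pvIsTgt := by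
  induction cs with
  | nil =>
    intro tc cur
    simp only [List.foldl_nil, pvFinish, pvWordsFrom]
    by_cases h : cur = []
    · simp [h]
    · rw [if_pos (by simpa using h), if_neg h, List.countP_cons, List.countP_nil, pv_target_eq']
      cases ht : pvIsTgt cur <;> simp [ht]
  | cons c cs ih =>
    intro tc cur
    simp only [List.foldl_cons, pvStepA, pvWordsFrom]
    by_cases ha : PySem.Chars.isalpha c
    · simp only [ha, if_pos]
      exact ih tc (cur ++ [c])
    · simp only [ha, Bool.false_eq_true, if_false]
      by_cases h : cur = []
      · simp only [h, ne_eq, not_true_eq_false, if_false, if_pos]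
        simpa [h] using ih tc []
      · simp only [h, ne_eq, not_false_eq_true, if_true, if_neg,
          List.countP_cons, pv_target_eq']
        rw [ih _ []]
        cases ht : pvIsTgt cur <;> simp [ht] <;> omega

-- the pending-word tokenizer agrees with the takeWhile/dropWhile tokenizer
theorem pv_words_both (n : Nat) : ∀ (cs : List Char), cs.length ≤ n →
    (pvWordsFrom [] cs = pvWords cs ∧
     ∀ cur : List Char, cur ≠ [] →
       pvWordsFrom cur cs =
         (cur ++ cs.takeWhile PySem.Chars.isalpha) :: pvWords (cs.dropWhile PySem.Chars.isalpha)) := by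
  induction n with
  | zero =>
    intro cs hlen
    have : cs = [] := List.eq_nil_of_length_eq_zero (Nat.le_zero.mp hlen)
    subst this
    constructor
    · simp [pvWordsFrom, pvWords]
    · intro cur hc; simp [pvWordsFrom, pvWords, hc]
  | succ n ih =>
    intro cs hlen
    cases cs with
    | nil =>
      constructor
      · simp [pvWordsFrom, pvWords]
      · intro cur hc; simp [pvWordsFrom, pvWords, hc]
    | cons c cs' =>
      have hlen' : cs'.length ≤ n := by simpa using Nat.succ_le_succ_iff.mp hlen
      have ih' := ih cs' hlen'
      constructor
      · by_cases ha : PySem.Chars.isalpha c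
        · rw [pvWordsFrom, if_pos ha]
          simp only [List.nil_append]
          rw [ih'.2 [c] (by simp), pvWords, if_pos ha]
          simp [List.takeWhile_cons, List.dropWhile_cons, ha]
        · rw [pvWordsFrom, if_neg (by simp [ha]), if_pos rfl, ih'.1]
          rw [pvWords, if_neg (by simp [ha])]
      · intro cur hc
        by_cases ha : PySem.Chars.isalpha c
        · rw [pvWordsFrom, if_pos ha, ih'.2 (cur ++ [c]) (by simp)]
          simp [List.takeWhile_cons, List.dropWhile_cons, ha]
        · have htk : List.takeWhile PySem.Chars.isalpha (c :: cs') = [] := by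
            simp [List.takeWhile_cons, ha]
          have hdr : List.dropWhile PySem.Chars.isalpha (c :: cs') = c :: cs' := by
            simp [List.dropWhile_cons, ha]
          rw [pvWordsFrom, if_neg (by simp [ha]), if_neg hc, ih'.1, htk, hdr,
            List.append_nil]
          congr 1
          rw [pvWords, if_neg (by simp [ha])]

-- ===== VERDICT (by name: the statement is the Claim_ definition above) =====
theorem process_3j_spec : Claim_equal_process_3j := by
  intro sentence _
  have h2 := (pv_words_both sentence.toList.length sentence.toList le_rfl).1
  have key : pvFinish (sentence.toList.foldl pvStepA (0, ([] : List Char))) =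
      (pvWords sentence.toList).countP (fun w => pvTargets.contains (PySem.Chars.lower w)) := by
    rw [pv_foldA_eq _ 0 [], h2, Nat.zero_add]
    refine List.countP_congr ?_
    intro w _
    simp [pvIsTgt]
  show (if pvFinish (sentence.toList.foldl pvStepA (0, ([] : List Char))) ≥ 2
        then sentence else "") =
      (if (pvWords sentence.toList).countP
            (fun w => pvTargets.contains (PySem.Chars.lower w)) ≥ 2
        then sentence else "")
  rw [key]
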